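-- pv_equiv track=rewrite | github.com/rickscole/MathSundries | Mancala/Object-Oriented 4D Example with Iterative Folding and Cycle Control.py | redistribute_first_position
-- ===== SOURCE A (Python) =====
-- def redistribute_first_position(input_board, output_board, gini, pareto):
--     '''
--     Redistribute the marbles in the first position to the other positions
--     Return the what the new board looks like
--     '''
--     for e, i in enumerate(output_board):
--         if pareto == 0:
--             output_board[e] = input_board[e] + gini
--         elif e == 0 or e > pareto:
--             output_board[e] = input_board[e] + gini
--         else:
--             output_board[e] = input_board[e] + gini + 1
--     return(output_board)
-- ===== SOURCE B (Python) =====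
-- def redistribute_first_position(input_board, output_board, gini, pareto):
--     n = len(output_board)
--     base = [x + gini for x in input_board[:n]]
--     k = 1 + max(0, min(pareto, n - 1))  # end of the '+1' slice (empty when pareto <= 0)
--     output_board[:] = base[:1] + [x + 1 for x in base[1:k]] + base[k:]
--     return output_board
-- ===== Notes on version B (the rewrite author's own statement) =====
-- stated objective: alternative
-- what changed: Replaces A's index loop with a per-element three-way branch by a whole-list construction: one comprehension builds the shifted board from input_board[:n], slicing splits it into head / interior-to-pareto / tail, the interior slice is mapped +1, and the concatenation is written back into output_board with slice assignment; no index arithmetic or branches per element remain.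
import Mathlib
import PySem

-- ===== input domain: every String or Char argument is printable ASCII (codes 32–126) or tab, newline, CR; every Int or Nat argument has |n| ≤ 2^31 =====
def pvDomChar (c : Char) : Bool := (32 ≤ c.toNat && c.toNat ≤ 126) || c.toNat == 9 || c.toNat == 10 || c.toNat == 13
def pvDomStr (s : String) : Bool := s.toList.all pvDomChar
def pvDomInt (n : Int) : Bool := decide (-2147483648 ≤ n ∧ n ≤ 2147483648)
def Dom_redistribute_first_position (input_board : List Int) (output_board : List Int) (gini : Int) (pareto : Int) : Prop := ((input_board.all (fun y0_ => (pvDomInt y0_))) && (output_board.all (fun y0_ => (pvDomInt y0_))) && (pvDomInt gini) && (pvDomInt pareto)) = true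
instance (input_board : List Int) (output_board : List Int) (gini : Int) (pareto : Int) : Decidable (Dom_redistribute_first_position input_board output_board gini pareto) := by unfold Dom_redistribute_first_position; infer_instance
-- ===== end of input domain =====

-- B replaces A's per-index branch loop by whole-list construction: a shifted copy of
-- input_board[:n] is split by slicing, the interior slice gets +1, and the concatenation
-- is written back (objective: alternative). Both Pythons mutate output_board in place;
-- the equivalence proved here is about the return value.

-- ===== PORT A =====
def redistribute_first_position (input_board : List Int) (output_board : List Int) (gini : Int) (pareto : Int) : List Int :=
  -- 'for e, i in enumerate(output_board)': i is unused and len(output_board) never changes,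
  -- so the loop is a fold over the indices 0..len-1; pyGetD with default 0 is exact inside Pre_.
  (List.range output_board.length).foldl
    (fun acc e =>
      if pareto = 0 then
        acc.set e (PySem.List.pyGetD input_board (e : Int) 0 + gini)
      else if e = 0 ∨ (e : Int) > pareto then
        acc.set e (PySem.List.pyGetD input_board (e : Int) 0 + gini)
      else
        acc.set e (PySem.List.pyGetD input_board (e : Int) 0 + gini + 1))
    output_board

-- ===== PORT B =====
def redistribute_first_position_alt (input_board : List Int) (output_board : List Int) (gini : Int) (pareto : Int) : List Int :=
  -- n = len(output_board); base = [x + gini for x in input_board[:n]]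
  let n : Int := (output_board.length : Int)
  let base : List Int := (PySem.List.slice input_board none (some n)).map (· + gini)
  -- k = 1 + max(0, min(pareto, n - 1))
  let k : Int := 1 + max 0 (min pareto (n - 1))
  -- output_board[:] = base[:1] + [x + 1 for x in base[1:k]] + base[k:]  (return value)
  PySem.List.slice base none (some 1)
    ++ (PySem.List.slice base (some 1) (some k)).map (· + 1)
    ++ PySem.List.slice base (some k) none

-- ===== PRECONDITION & SPEC =====
-- Pre_ excludes exactly the inputs where A raises IndexError: output_board longer than input_board.
def Pre_redistribute_first_position (input_board : List Int) (output_board : List Int) (gini : Int) (pareto : Int) : Prop :=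
  output_board.length ≤ input_board.length
instance (input_board : List Int) (output_board : List Int) (gini : Int) (pareto : Int) : Decidable (Pre_redistribute_first_position input_board output_board gini pareto) := by unfold Pre_redistribute_first_position; infer_instance
def pvWitness_redistribute_first_position : List Int × List Int × Int × Int := ([1, 2, 3], [0, 0, 0], 2, 1)

def Spec_redistribute_first_position (input_board : List Int) (output_board : List Int) (gini : Int) (pareto : Int) (out : List Int) : Prop := out = redistribute_first_position_alt input_board output_board gini pareto
instance (input_board : List Int) (output_board : List Int) (gini : Int) (pareto : Int) (out : List Int) : Decidable (Spec_redistribute_first_position input_board output_board gini pareto out) := by unfold Spec_redistribute_first_position; infer_instance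

-- ===== CLAIM (what is proved, stated in full; the proofs are below) =====
def Claim_equal_redistribute_first_position : Prop := ∀ (input_board : List Int) (output_board : List Int) (gini : Int) (pareto : Int), Dom_redistribute_first_position input_board output_board gini pareto → Pre_redistribute_first_position input_board output_board gini pareto → Spec_redistribute_first_position input_board output_board gini pareto (redistribute_first_position input_board output_board gini pareto)

-- ===== LEMMAS AND PROOFS =====

-- a left fold of 'set e (g e)' over consecutive indices, characterised elementwise
lemma pv_setfold (g : Nat → Int) : ∀ (k a : Nat) (xs : List Int) (i : Nat),
    ((List.range' a k).foldl (fun acc e => acc.set e (g e)) xs)[i]? =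
      if a ≤ i ∧ i < a + k ∧ i < xs.length then some (g i) else xs[i]? := by
  intro k
  induction k with
  | zero =>
    intro a xs i
    rw [if_neg (by rintro ⟨h1, h2, -⟩; omega)]
    simp [List.range']
  | succ k ih =>
    intro a xs i
    rw [List.range'_succ, List.foldl_cons, ih]
    simp only [List.length_set, List.getElem?_set]
    split_ifs <;> simp_all <;> omega

-- arithmetic facts about the split point K = (1 + max 0 (min pareto (n-1))).toNat
lemma pv_lt_K {p : Int} {n i : Nat} (h0 : i ≠ 0)
    (hiK : i < (1 + max 0 (min p ((n : Int) - 1))).toNat) :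
    ¬ (p = 0 ∨ i = 0 ∨ (i : Int) > p) := by
  rintro (h | h | h) <;> omega

lemma pv_ge_K {p : Int} {n i : Nat} (hi : i < n)
    (hiK : ¬ i < (1 + max 0 (min p ((n : Int) - 1))).toNat) :
    p = 0 ∨ i = 0 ∨ (i : Int) > p := by
  by_cases hp : p = 0
  · exact Or.inl hp
  · right; right; omega

lemma pv_K_le {p : Int} {n : Nat} (hn : 1 ≤ n) :
    (1 + max 0 (min p ((n : Int) - 1))).toNat ≤ n := by omega

lemma pv_one_le_K (p : Int) (n : Nat) :
    1 ≤ (1 + max 0 (min p ((n : Int) - 1))).toNat := by omega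

-- ===== VERDICT (by name: the statement is the Claim_ definition above) =====
theorem redistribute_first_position_spec : Claim_equal_redistribute_first_position := by
  intro ib ob gini pareto _hdom hpre
  unfold Spec_redistribute_first_position
  unfold Pre_redistribute_first_position at hpre
  set n := ob.length with hn
  set g : Nat → Int := fun e => PySem.List.pyGetD ib (e : Int) 0 + gini with hg
  -- A's fold is a 'set' fold with a 0/1 increment
  have hA : redistribute_first_position ib ob gini pareto =
      (List.range' 0 n).foldl (fun acc e => acc.set e
        (g e + (if pareto = 0 ∨ e = 0 ∨ (e : Int) > pareto then 0 else 1))) ob := by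
    rw [redistribute_first_position, List.range_eq_range']
    congr 1
    funext acc e
    split_ifs <;> simp_all <;> try omega
  -- B in take/drop/map form
  have hK1 : (0 : Int) ≤ 1 + max 0 (min pareto ((n : Int) - 1)) := by positivity
  set K : Nat := (1 + max 0 (min pareto ((n : Int) - 1))).toNat with hK
  have hB : redistribute_first_position_alt ib ob gini pareto =
      (let base := (ib.take n).map (· + gini)
       base.take 1 ++ ((base.drop 1).take (K - 1)).map (· + 1) ++ base.drop K) := by
    rw [redistribute_first_position_alt]
    have h1 : (1 : Int) = ((1 : Nat) : Int) := rfl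
    have h2 : (1 + max 0 (min pareto ((n : Int) - 1))) = ((K : Nat) : Int) := by
      rw [hK]; omega
    rw [show ((ob.length : Int)) = ((n : Nat) : Int) from by rw [hn]]
    rw [PySem.List.slice_to_natCast, h2, h1, PySem.List.slice_to_natCast,
        PySem.List.slice_natCast, PySem.List.slice_from_natCast]
  rw [hA, hB]
  apply List.ext_getElem?
  intro i
  rw [pv_setfold]
  have hdlt : ∀ j : Nat, j ≠ 0 → j < K → ¬ (pareto = 0 ∨ j = 0 ∨ (j : Int) > pareto) :=
    fun j hj hjK => pv_lt_K hj (hK ▸ hjK)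
  have hdge : ∀ j : Nat, j < n → ¬ j < K → (pareto = 0 ∨ j = 0 ∨ (j : Int) > pareto) :=
    fun j hj hjK => pv_ge_K hj (hK ▸ hjK)
  have hK1' : 1 ≤ K := hK ▸ pv_one_le_K pareto n
  have hKn : 1 ≤ n → K ≤ n := fun h => hK ▸ pv_K_le h
  clear_value K
  clear hK hK1
  simp only [List.getElem?_append, List.getElem?_map, List.getElem?_take, List.getElem?_drop,
    List.length_append, List.length_map, List.length_take, List.length_drop,
    Nat.min_eq_left hpre]
  by_cases hi : i < n
  · rw [if_pos ⟨Nat.zero_le _, by omega, by omega⟩]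
    have hKn' : K ≤ n := hKn (by omega)
    have h1n : min 1 n = 1 := by omega
    have hgi : ∀ j, j < n → (Option.map (· + gini) ib[j]?) = some (g j) := by
      intro j hj
      rw [List.getElem?_eq_getElem (by omega)]
      simp [hg, PySem.List.pyGetD_natCast, List.getD,
        List.getElem?_eq_getElem (show j < ib.length by omega)]
    by_cases h0 : i = 0
    · subst h0
      rw [if_pos (Or.inr (Or.inl rfl)), h1n, if_pos (by omega), if_pos (by omega),
          if_pos (by omega), if_pos hi, hgi 0 hi]
      simp
    · by_cases hiK : i < K
      · rw [if_neg (hdlt i h0 hiK), h1n, if_pos (by omega), if_neg (by omega),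
            if_pos (by omega), show 1 + (i - 1) = i from by omega, if_pos hi, hgi i hi]
        simp
      · rw [if_pos (hdge i hi hiK), h1n, if_neg (by omega),
            show K + (i - (1 + min (K - 1) (n - 1))) = i from by omega, if_pos hi, hgi i hi]
        simp
  · rw [if_neg (by omega), List.getElem?_eq_none (by omega : ob.length ≤ i),
        if_neg (by omega), if_neg (by omega)]
    simp
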